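-- pv_equiv track=rewrite | github.com/alexandraback/datacollection | solutions_5769900270288896_0/Python/MisterAnderson/B-neigbors.py | rowUnhappiness
-- ===== SOURCE A (Python) =====
-- def rowUnhappiness(row):
--     u= 0
--     last= row[0]
--     for cell in row[1:]:
--         if last and cell:
--             u+= 1
--         last= cell
--     return u
-- ===== SOURCE B (Python) =====
-- def rowUnhappiness(row):
--     total = 0
--     run = 0
--     for cell in row:
--         if cell:
--             run += 1
--         else:
--             if run > 0:
--                 total += run - 1
--             run = 0
--     if run > 0:
--         total += run - 1
--     return total
-- ===== Notes on version B (the rewrite author's own statement) =====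
-- stated objective: alternative
-- what changed: B sums (length-1) over maximal runs of consecutive truthy cells accumulated in one run-length pass, instead of A's pairwise check of each element against the previous one.
import Mathlib
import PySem

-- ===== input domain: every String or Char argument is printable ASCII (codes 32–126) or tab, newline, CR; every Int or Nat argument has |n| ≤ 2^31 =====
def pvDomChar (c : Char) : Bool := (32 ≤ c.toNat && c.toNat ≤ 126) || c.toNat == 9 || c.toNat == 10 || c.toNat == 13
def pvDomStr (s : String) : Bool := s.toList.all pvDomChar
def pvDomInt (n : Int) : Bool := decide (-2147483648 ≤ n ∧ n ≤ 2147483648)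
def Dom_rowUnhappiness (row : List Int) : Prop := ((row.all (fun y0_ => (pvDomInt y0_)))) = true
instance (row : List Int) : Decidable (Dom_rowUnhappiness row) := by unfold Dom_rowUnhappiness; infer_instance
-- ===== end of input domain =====

-- B replaces A's pairwise previous/current check by a run-length pass summing (run-1) over
-- maximal truthy runs (objective: alternative); return-value equivalence on nonempty rows.

-- ===== PORT A =====
-- the for-loop of A: state (last, u), branch 'if last and cell'
def rowUnhappinessLoopA : List Int → Int → Int → Int
  | [], _, u => u
  | c :: rest, last, u =>
      rowUnhappinessLoopA rest c (if last ≠ 0 ∧ c ≠ 0 then u + 1 else u)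

def rowUnhappiness (row : List Int) : Int :=
  match row with
  | [] => 0          -- Python raises IndexError reading the first element; excluded by Pre_rowUnhappiness
  | last :: rest => rowUnhappinessLoopA rest last 0   -- row[1:] is the tail

-- ===== PORT B =====
-- B's loop: state (run, total); flush 'total += run - 1' when run ends, and once at the end
def rowUnhappinessLoopB : List Int → Int → Int → Int
  | [], run, total => if run > 0 then total + run - 1 else total
  | c :: rest, run, total =>
      if c ≠ 0 then rowUnhappinessLoopB rest (run + 1) total
      else rowUnhappinessLoopB rest 0 (if run > 0 then total + run - 1 else total)

def rowUnhappiness_alt (row : List Int) : Int :=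
  rowUnhappinessLoopB row 0 0

-- ===== PRECONDITION & SPEC =====
-- A reads the first element and raises IndexError on the empty row; Pre_ excludes exactly that.
def Pre_rowUnhappiness (row : List Int) : Prop := row ≠ []
instance (row : List Int) : Decidable (Pre_rowUnhappiness row) := by unfold Pre_rowUnhappiness; infer_instance
def pvWitness_rowUnhappiness : List Int := ([1, 1, 0, 1])

def Spec_rowUnhappiness (row : List Int) (out : Int) : Prop := out = rowUnhappiness_alt row
instance (row : List Int) (out : Int) : Decidable (Spec_rowUnhappiness row out) := by unfold Spec_rowUnhappiness; infer_instance

-- ===== CLAIM (what is proved, stated in full; the proofs are below) =====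
def Claim_equal_rowUnhappiness : Prop := ∀ (row : List Int), Dom_rowUnhappiness row → Pre_rowUnhappiness row → Spec_rowUnhappiness row (rowUnhappiness row)

-- ===== LEMMAS AND PROOFS =====
-- Loop invariant: A's state (last, u) and B's state (run, total) stay related by
-- (last ≠ 0 ↔ run > 0) and u = (if run > 0 then total + run - 1 else total).
theorem loop_invariant (cells : List Int) :
    ∀ (last u run total : Int), 0 ≤ run → (last ≠ 0 ↔ run > 0) →
      u = (if run > 0 then total + run - 1 else total) →
      rowUnhappinessLoopA cells last u = rowUnhappinessLoopB cells run total := by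
  induction cells with
  | nil =>
      intro last u run total _ _ hu
      simpa [rowUnhappinessLoopA, rowUnhappinessLoopB] using hu
  | cons c rest ih =>
      intro last u run total hnn h hu
      simp only [rowUnhappinessLoopA, rowUnhappinessLoopB]
      by_cases hc : c = 0
      · subst hc
        have e1 : (if last ≠ 0 ∧ (0:Int) ≠ 0 then u + 1 else u) = u := by simp
        have e2 : (if (0:Int) ≠ 0 then rowUnhappinessLoopB rest (run + 1) total
            else rowUnhappinessLoopB rest 0 (if run > 0 then total + run - 1 else total))
            = rowUnhappinessLoopB rest 0 (if run > 0 then total + run - 1 else total) := by simp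
        rw [e1, e2]
        exact ih 0 u 0 (if run > 0 then total + run - 1 else total)
          le_rfl (by simp) (by simpa using hu)
      · rw [if_pos hc]
        by_cases hl : last = 0
        · have hr0 : run = 0 := by
            have : ¬ run > 0 := fun hr => (h.mpr hr) hl; omega
          rw [show (if last ≠ 0 ∧ c ≠ 0 then u + 1 else u) = u by simp [hl]]
          refine ih c u (run + 1) total (by omega) ⟨fun _ => by omega, fun _ => hc⟩ ?_
          simp only [hr0] at hu ⊢
          simpa using hu
        · have hr : run > 0 := h.mp hl
          rw [show (if last ≠ 0 ∧ c ≠ 0 then u + 1 else u) = u + 1 by simp [hl, hc]]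
          refine ih c (u + 1) (run + 1) total (by omega) ⟨fun _ => by omega, fun _ => hc⟩ ?_
          rw [if_pos hr] at hu
          rw [if_pos (by omega : run + 1 > 0)]
          omega

-- ===== VERDICT (by name: the statement is the Claim_ definition above) =====
theorem rowUnhappiness_spec : Claim_equal_rowUnhappiness := by
  intro row _ hpre
  unfold Spec_rowUnhappiness rowUnhappiness rowUnhappiness_alt
  match row with
  | [] => exact absurd rfl hpre
  | last :: rest =>
      simp only [rowUnhappinessLoopB]
      by_cases hl : last = 0
      · rw [if_neg (by simp [hl])]
        exact loop_invariant rest last 0 0 0 le_rfl (by simp [hl]) (by simp)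
      · rw [if_pos hl]
        exact loop_invariant rest last 0 1 0 (by omega) (by simp [hl]) (by simp)
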